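-- pv_equiv track=rewrite | github.com/tkmharris/aoc2024 | solutions/day22.py | advance_secret
-- ===== SOURCE A (Python) =====
-- def last24_bits(number: int):
--     bitmask = (1 << 24) - 1
--     return number & bitmask
--
-- def advance_secret(secret: int, rounds: int = 1) -> int:
--     def advance_one(secret):
--         secret = last24_bits((secret << 6) ^ secret)
--         secret = last24_bits((secret >> 5) ^ secret)
--         secret = last24_bits((secret << 11) ^ secret)
--         return secret
--
--     for _ in range(rounds):
--         secret = advance_one(secret)
--
--     return secret
-- ===== SOURCE B (Python) =====
-- def advance_secret(secret: int, rounds: int = 1) -> int: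
--     # One round is a GF(2)-linear map on 24-bit states; apply M^rounds to the
--     # state via binary exponentiation (square the basis-image table, O(log rounds)).
--     if rounds <= 0:
--         return secret
--     M = 0xFFFFFF
--
--     def step(s):
--         s = ((s << 6) ^ s) & M
--         s = ((s >> 5) ^ s) & M
--         return ((s << 11) ^ s) & M
--
--     def apply(rows, v):
--         acc = 0
--         for i in range(24):
--             if (v >> i) & 1:
--                 acc ^= rows[i]
--         return acc
--
--     rows = [step(1 << i) for i in range(24)]
--     v = secret & M
--     n = rounds
--     while n:
--         if n & 1:
--             v = apply(rows, v)
--         rows = [apply(rows, r) for r in rows]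
--         n >>= 1
--     return v
-- ===== Notes on version B (the rewrite author's own statement) =====
-- stated objective: faster
-- what changed: One round is a GF(2)-linear map on 24-bit states, so B replaces A's rounds-fold of the per-round update with binary exponentiation of the map's basis-image table (square the table, apply it on set bits of rounds).
import Mathlib
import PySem

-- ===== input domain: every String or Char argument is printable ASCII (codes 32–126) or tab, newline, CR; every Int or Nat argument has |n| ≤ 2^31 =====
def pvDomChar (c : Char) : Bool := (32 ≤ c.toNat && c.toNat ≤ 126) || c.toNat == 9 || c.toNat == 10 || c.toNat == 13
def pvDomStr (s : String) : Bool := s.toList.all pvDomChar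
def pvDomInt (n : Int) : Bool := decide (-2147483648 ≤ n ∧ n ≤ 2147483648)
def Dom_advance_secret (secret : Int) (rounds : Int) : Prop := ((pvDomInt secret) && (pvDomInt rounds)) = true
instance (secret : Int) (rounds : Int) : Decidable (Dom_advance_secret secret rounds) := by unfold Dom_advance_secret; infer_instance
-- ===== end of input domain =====

-- B replaces A's rounds-long fold of the per-round update by binary exponentiation of the
-- round map's GF(2) basis-image table: an asymptotic speed-up (O(rounds) → O(24² · log rounds)).

-- ===== PORT A =====
def pvLast24 (number : Int) : Int :=
  let bitmask : Int := (1 <<< 24) - 1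
  PySem.Int.band number bitmask

def pvAdvanceOne (secret : Int) : Int :=
  let s1 := pvLast24 (PySem.Int.bxor (secret <<< (6 : Nat)) secret)
  let s2 := pvLast24 (PySem.Int.bxor (s1 >>> (5 : Nat)) s1)
  pvLast24 (PySem.Int.bxor (s2 <<< (11 : Nat)) s2)

def advance_secret (secret : Int) (rounds : Int) : Int :=
  (PySem.List.pyRange 0 rounds 1).foldl (fun s _ => pvAdvanceOne s) secret

-- ===== PORT B =====
def pvMask : Nat := 0xFFFFFF

def pvStep (s : Nat) : Nat :=
  let a := ((s <<< 6) ^^^ s) &&& pvMask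
  let b := ((a >>> 5) ^^^ a) &&& pvMask
  ((b <<< 11) ^^^ b) &&& pvMask

-- `if v.testBit i` is Python's `if (v >> i) & 1:` (truthiness = the bit is set)
def pvApply (rows : List Nat) (v : Nat) : Nat :=
  (List.range 24).foldl (fun acc i => if v.testBit i then acc ^^^ rows.getD i 0 else acc) 0

def pvRows0 : List Nat := (List.range 24).map (fun i => pvStep (1 <<< i))

def pvLoop (rows : List Nat) (n : Nat) (v : Nat) : Nat :=
  if n = 0 then v
  else pvLoop (rows.map (pvApply rows)) (n / 2) (if n % 2 = 1 then pvApply rows v else v)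
termination_by n
decreasing_by exact Nat.div_lt_self (Nat.pos_of_ne_zero (by assumption)) (by norm_num)

def advance_secret_alt (secret : Int) (rounds : Int) : Int :=
  if rounds ≤ 0 then secret
  else ((pvLoop pvRows0 rounds.toNat ((PySem.Int.band secret ((1 <<< 24) - 1)).toNat) : Nat) : Int)

-- ===== PRECONDITION & SPEC =====
def Spec_advance_secret (secret : Int) (rounds : Int) (out : Int) : Prop := out = advance_secret_alt secret rounds
instance (secret : Int) (rounds : Int) (out : Int) : Decidable (Spec_advance_secret secret rounds out) := by unfold Spec_advance_secret; infer_instance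

-- ===== CLAIM (what is proved, stated in full; the proofs are below) =====
def Claim_equal_advance_secret : Prop := ∀ (secret : Int) (rounds : Int), Dom_advance_secret secret rounds → Spec_advance_secret secret rounds (advance_secret secret rounds)

-- ===== LEMMAS AND PROOFS =====

-- low 24 bits of a Python int, as a Nat
def pvLow (x : Int) : Nat := (x % 16777216).toNat

-- a + b = (a XOR b) + 2·(a AND b): the classic carry identity
theorem pvAddXorAnd (a : Nat) : ∀ b : Nat, a + b = (a ^^^ b) + 2 * (a &&& b) := by
  induction a using Nat.strong_induction_on with
  | _ a ih =>
    intro b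
    rcases Nat.eq_zero_or_pos a with ha | ha
    · simp [ha]
    · have hdx : (a ^^^ b) / 2 = a / 2 ^^^ b / 2 := Nat.xor_div_two
      have hda : (a &&& b) / 2 = a / 2 &&& b / 2 := Nat.and_div_two
      have hmx : (a ^^^ b) % 2 = (a % 2) ^^^ (b % 2) := by
        rw [← Nat.and_one_is_mod, ← Nat.and_one_is_mod, ← Nat.and_one_is_mod,
          Nat.and_xor_distrib_right]
      have hma : (a &&& b) % 2 = (a % 2) &&& (b % 2) := by
        rw [← Nat.and_one_is_mod, ← Nat.and_one_is_mod, ← Nat.and_one_is_mod]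
        apply Nat.eq_of_testBit_eq
        intro i
        simp only [Nat.testBit_and]
        cases a.testBit i <;> cases b.testBit i <;> cases (1 : Nat).testBit i <;> rfl
      have ih2 := ih (a / 2) (Nat.div_lt_self ha (by norm_num)) (b / 2)
      have h2a := Nat.div_add_mod a 2
      have h2b := Nat.div_add_mod b 2
      have h2x := Nat.div_add_mod (a ^^^ b) 2
      have h2n := Nat.div_add_mod (a &&& b) 2
      have hlow : a % 2 + b % 2 = ((a % 2) ^^^ (b % 2)) + 2 * ((a % 2) &&& (b % 2)) := by
        have : a % 2 < 2 := Nat.mod_lt _ (by norm_num)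
        have : b % 2 < 2 := Nat.mod_lt _ (by norm_num)
        interval_cases h1 : a % 2 <;> interval_cases h2 : b % 2 <;> decide
      omega

theorem pvXorDisj (a b : Nat) (h : a &&& b = 0) : a ^^^ b = a + b := by
  have := pvAddXorAnd a b; omega

theorem pvMaskSub (n z : Nat) (h : z < 2 ^ n) : 2 ^ n - 1 - z = (2 ^ n - 1) ^^^ z := by
  have hd : ((2 ^ n - 1) ^^^ z) &&& z = 0 := by
    apply Nat.eq_of_testBit_eq
    intro i
    simp only [Nat.testBit_and, Nat.testBit_xor, Nat.testBit_two_pow_sub_one, Nat.zero_testBit]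
    by_cases hi : i < n
    · simp [hi]
    · have : z < 2 ^ i := lt_of_lt_of_le h (Nat.pow_le_pow_right (by norm_num) (by omega))
      simp [Nat.testBit_lt_two_pow this]
  have hsum : ((2 ^ n - 1) ^^^ z) + z = 2 ^ n - 1 := by
    rw [← pvXorDisj _ _ hd, Nat.xor_assoc, Nat.xor_self, Nat.xor_zero]
  omega

theorem pvXorLt (a b : Nat) (ha : a < 16777216) (hb : b < 16777216) : a ^^^ b < 16777216 := by
  have h24 : (2 : Nat) ^ 24 = 16777216 := by norm_num
  rw [← h24] at ha hb ⊢
  exact Nat.xor_lt_two_pow ha hb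

theorem pvAndMask (x : Nat) : x &&& pvMask = x % 16777216 := by
  have := Nat.and_two_pow_sub_one_eq_mod x 24
  norm_num at this
  simpa [pvMask] using this

-- pvLow of the PySem bitwise primitives

theorem pvLow_natCast (m : Nat) : pvLow (m : Int) = m % 16777216 := by
  simp only [pvLow]; omega

theorem pvLow_neg (u : Nat) : pvLow (-(u : Int) - 1) = 16777215 - u % 16777216 := by
  simp only [pvLow]; omega

theorem pvBandMask (x : Int) : PySem.Int.band x ((1 <<< 24) - 1) = ((pvLow x : Nat) : Int) := by
  have hM : ((1 <<< 24 : Nat) : Int) - 1 = (16777215 : Int) := by decide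
  rw [hM]
  by_cases hx : 0 ≤ x
  · rw [PySem.Int.band_of_nonneg hx (by norm_num)]
    have h7 : (16777215 : Int).toNat = 16777215 := rfl
    rw [h7]
    have h6 := pvAndMask x.toNat
    simp only [pvMask] at h6
    rw [h6]
    congr 1
    simp only [pvLow]
    omega
  · have hxu : x = -(((-x - 1).toNat : Nat) : Int) - 1 := by omega
    set u := (-x - 1).toNat with hu
    rw [hxu, pvLow_neg]
    show PySem.Int.band (-(u : Int) - 1) 16777215 = _
    have h1 : ¬ (0 ≤ -(u : Int) - 1) := by omega
    have h2 : (0 : Int) ≤ 16777215 := by norm_num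
    rw [PySem.Int.band_comm]
    unfold PySem.Int.band
    simp only [h1, h2, if_true, if_false]
    have h3 : (-(-(u : Int) - 1) - 1).toNat = u := by omega
    have h4 : (16777215 : Int).toNat = 16777215 := by decide
    rw [h3, h4]
    have h5 : 16777215 &&& u = u % 16777216 := by
      rw [Nat.and_comm]
      have := pvAndMask u
      simpa [pvMask] using this
    rw [h5]

theorem pvLow_lt (x : Int) : pvLow x < 16777216 := by
  simp only [pvLow]; omega

theorem pvBxorLow (x y : Int) :
    pvLow (PySem.Int.bxor x y) = pvLow x ^^^ pvLow y := by
  have key : ∀ a b : Nat, (a ^^^ b) % 16777216 = a % 16777216 ^^^ b % 16777216 := by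
    intro a b
    have h1 := pvAndMask (a ^^^ b)
    have h2 := pvAndMask a
    have h3 := pvAndMask b
    rw [← h1, ← h2, ← h3, Nat.and_xor_distrib_right]
  have hlt : ∀ a : Nat, a % 16777216 < 2 ^ 24 := by intro a; omega
  have hsub : ∀ a : Nat, a < 16777216 → 16777215 - a = 16777215 ^^^ a := by
    intro a ha
    have := pvMaskSub 24 a (by norm_num; omega)
    norm_num at this ⊢
    exact this
  unfold PySem.Int.bxor
  by_cases hx : 0 ≤ x <;> by_cases hy : 0 ≤ y <;> simp only [hx, hy, if_true, if_false]
  · have hx' : x = ((x.toNat : Nat) : Int) := by omega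
    have hy' : y = ((y.toNat : Nat) : Int) := by omega
    rw [pvLow_natCast]
    conv_rhs => rw [hx', hy', pvLow_natCast, pvLow_natCast]
    exact key _ _
  · set u := (-y - 1).toNat with hu
    have hy' : y = -(u : Int) - 1 := by omega
    have h1 : pvLow (-(((x.toNat ^^^ u) : Nat) : Int) - 1) = 16777215 - (x.toNat ^^^ u) % 16777216 :=
      pvLow_neg _
    have hx' : x = ((x.toNat : Nat) : Int) := by omega
    rw [h1]
    conv_rhs => rw [hx', hy', pvLow_natCast, pvLow_neg]
    rw [key, hsub _ (pvXorLt _ _ (by omega) (by omega)), hsub (u % 16777216) (by omega)]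
    simp [Nat.xor_left_comm]
  · set u := (-x - 1).toNat with hu
    have hx' : x = -(u : Int) - 1 := by omega
    have h1 : pvLow (-(((u ^^^ y.toNat) : Nat) : Int) - 1) = 16777215 - (u ^^^ y.toNat) % 16777216 :=
      pvLow_neg _
    have hy' : y = ((y.toNat : Nat) : Int) := by omega
    rw [h1]
    conv_rhs => rw [hx', hy', pvLow_neg, pvLow_natCast]
    rw [key, hsub _ (pvXorLt _ _ (by omega) (by omega)), hsub (u % 16777216) (by omega)]
    simp [Nat.xor_left_comm, Nat.xor_comm]
  · set u := (-x - 1).toNat with hu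
    set w := (-y - 1).toNat with hw
    have hx' : x = -(u : Int) - 1 := by omega
    have hy' : y = -(w : Int) - 1 := by omega
    rw [pvLow_natCast]
    conv_rhs => rw [hx', hy', pvLow_neg, pvLow_neg]
    rw [key, hsub (u % 16777216) (by omega), hsub (w % 16777216) (by omega)]
    simp [Nat.xor_left_comm, Nat.xor_comm]

theorem pvLowShl6 (x : Int) : pvLow (x <<< (6 : Nat)) = ((pvLow x) <<< 6) % 16777216 := by
  have h1 : x <<< (6 : Nat) = x * 64 := by rw [Int.shiftLeft_eq]; norm_num
  have h2 := Int.mul_emod x 64 16777216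
  norm_num at h2
  simp only [pvLow, h1, Nat.shiftLeft_eq]
  norm_num
  omega

theorem pvCastShr (a : Nat) : ((a : Int) >>> (5 : Nat)) = ((a >>> 5 : Nat) : Int) :=
  Int.mem_toNat?.mp rfl

theorem pvCastShl (a k : Nat) : ((a : Int) <<< (k : Nat)) = ((a <<< k : Nat) : Int) :=
  Int.mem_toNat?.mp rfl

theorem pvLow_cast_lt (m : Nat) (hm : m < 16777216) : pvLow ((m : Nat) : Int) = m := by
  rw [pvLow_natCast, Nat.mod_eq_of_lt hm]

theorem pvAndMask_lt (z : Nat) : z &&& pvMask < 16777216 :=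
  lt_of_le_of_lt Nat.and_le_right (by norm_num [pvMask])

theorem pvAdvBridge (s : Int) : pvAdvanceOne s = ((pvStep (pvLow s) : Nat) : Int) := by
  have htlt : pvLow s < 16777216 := pvLow_lt s
  have h1 : pvLast24 (PySem.Int.bxor (s <<< (6 : Nat)) s) =
      (((((pvLow s <<< 6) ^^^ pvLow s) &&& pvMask : Nat)) : Int) := by
    unfold pvLast24
    rw [pvBandMask, pvBxorLow, pvLowShl6]
    congr 1
    rw [Nat.and_xor_distrib_right, pvAndMask, pvAndMask, Nat.mod_eq_of_lt htlt]
  have h2 : ∀ a : Nat, a < 16777216 →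
      pvLast24 (PySem.Int.bxor (((a : Nat) : Int) >>> (5 : Nat)) ((a : Nat) : Int)) =
        ((((a >>> 5) ^^^ a) &&& pvMask : Nat) : Int) := by
    intro a ha
    unfold pvLast24
    rw [pvCastShr, pvBandMask, pvBxorLow,
      pvLow_cast_lt _ (lt_of_le_of_lt (Nat.shiftRight_le a 5) ha), pvLow_cast_lt _ ha]
    congr 1
    rw [Nat.and_xor_distrib_right, pvAndMask, pvAndMask,
      Nat.mod_eq_of_lt (lt_of_le_of_lt (Nat.shiftRight_le a 5) ha), Nat.mod_eq_of_lt ha]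
  have h3 : ∀ b : Nat, b < 16777216 →
      pvLast24 (PySem.Int.bxor (((b : Nat) : Int) <<< (11 : Nat)) ((b : Nat) : Int)) =
        ((((b <<< 11) ^^^ b) &&& pvMask : Nat) : Int) := by
    intro b hb
    unfold pvLast24
    rw [pvCastShl, pvBandMask, pvBxorLow, pvLow_cast_lt _ hb]
    congr 1
    rw [pvLow_natCast, Nat.and_xor_distrib_right, pvAndMask, pvAndMask, Nat.mod_eq_of_lt hb]
  show pvLast24 (PySem.Int.bxor
      ((pvLast24 (PySem.Int.bxor
        ((pvLast24 (PySem.Int.bxor (s <<< (6 : Nat)) s)) >>> (5 : Nat))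
        (pvLast24 (PySem.Int.bxor (s <<< (6 : Nat)) s)))) <<< (11 : Nat))
      (pvLast24 (PySem.Int.bxor
        ((pvLast24 (PySem.Int.bxor (s <<< (6 : Nat)) s)) >>> (5 : Nat))
        (pvLast24 (PySem.Int.bxor (s <<< (6 : Nat)) s))))) = _
  rw [h1, h2 _ (pvAndMask_lt _), h3 _ (pvAndMask_lt _)]
  rfl

theorem pvStep_lt (x : Nat) : pvStep x < 16777216 := by
  have h : ∀ z : Nat, z &&& pvMask < 16777216 :=
    fun z => lt_of_le_of_lt Nat.and_le_right (by norm_num [pvMask])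
  exact h _

theorem pvStep_zero : pvStep 0 = 0 := by decide

theorem pvLayerShl (k x y : Nat) :
    (((x ^^^ y) <<< k) ^^^ (x ^^^ y)) &&& pvMask =
      (((x <<< k) ^^^ x) &&& pvMask) ^^^ (((y <<< k) ^^^ y) &&& pvMask) := by
  rw [Nat.shiftLeft_xor_distrib, ← Nat.and_xor_distrib_right]
  congr 1
  simp [Nat.xor_left_comm, Nat.xor_comm]

theorem pvLayerShr (k x y : Nat) :
    (((x ^^^ y) >>> k) ^^^ (x ^^^ y)) &&& pvMask =
      (((x >>> k) ^^^ x) &&& pvMask) ^^^ (((y >>> k) ^^^ y) &&& pvMask) := by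
  rw [Nat.shiftRight_xor_distrib, ← Nat.and_xor_distrib_right]
  congr 1
  simp [Nat.xor_left_comm, Nat.xor_comm]

theorem pvStep_xor (x y : Nat) : pvStep (x ^^^ y) = pvStep x ^^^ pvStep y := by
  simp only [pvStep]
  rw [pvLayerShl 6 x y, pvLayerShr 5, pvLayerShl 11]

theorem pvApply_zero (rows : List Nat) : pvApply rows 0 = 0 := by
  simp [pvApply, Nat.zero_testBit]

theorem pvFoldXor (x y : Nat) (rows : List Nat) : ∀ (l : List Nat) (a b : Nat),
    l.foldl (fun acc i => if (x ^^^ y).testBit i then acc ^^^ rows.getD i 0 else acc) (a ^^^ b) =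
      (l.foldl (fun acc i => if x.testBit i then acc ^^^ rows.getD i 0 else acc) a) ^^^
      (l.foldl (fun acc i => if y.testBit i then acc ^^^ rows.getD i 0 else acc) b) := by
  intro l
  induction l with
  | nil => intro a b; rfl
  | cons i l ih =>
    intro a b
    simp only [List.foldl_cons]
    rw [Nat.testBit_xor]
    cases hx : x.testBit i <;> cases hy : y.testBit i <;>
      simp only [Bool.xor_false, Bool.xor_true, Bool.not_false, reduceIte]
    · exact ih a b
    · have hacc : (a ^^^ b) ^^^ rows.getD i 0 = a ^^^ (b ^^^ rows.getD i 0) := by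
        simp [Nat.xor_assoc]
      rw [hacc]; exact ih _ _
    · have hacc : (a ^^^ b) ^^^ rows.getD i 0 = (a ^^^ rows.getD i 0) ^^^ b := by
        simp [Nat.xor_assoc, Nat.xor_left_comm, Nat.xor_comm]
      rw [hacc]; exact ih _ _
    · have hacc : a ^^^ b = (a ^^^ rows.getD i 0) ^^^ (b ^^^ rows.getD i 0) := by
        simp [Nat.xor_left_comm, Nat.xor_comm]
      rw [hacc]; exact ih _ _

theorem pvApply_xor (rows : List Nat) (x y : Nat) :
    pvApply rows (x ^^^ y) = pvApply rows x ^^^ pvApply rows y := by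
  have h := pvFoldXor x y rows (List.range 24) 0 0
  simpa [pvApply] using h

theorem pvGetDMap (rows : List Nat) (g : Nat → Nat) (hg0 : g 0 = 0) (i : Nat) :
    (rows.map g).getD i 0 = g (rows.getD i 0) := by
  simp only [List.getD_eq_getElem?_getD, List.getElem?_map]
  cases rows[i]? <;> simp [hg0]

theorem pvFoldMap (rows : List Nat) (g : Nat → Nat)
    (hg : ∀ x y, g (x ^^^ y) = g x ^^^ g y) (hg0 : g 0 = 0) (v : Nat) :
    ∀ (l : List Nat) (a : Nat),
      l.foldl (fun acc i => if v.testBit i then acc ^^^ (rows.map g).getD i 0 else acc) (g a) =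
        g (l.foldl (fun acc i => if v.testBit i then acc ^^^ rows.getD i 0 else acc) a) := by
  intro l
  induction l with
  | nil => intro a; rfl
  | cons i l ih =>
    intro a
    simp only [List.foldl_cons]
    cases hv : v.testBit i <;> simp only [Bool.false_eq_true, reduceIte]
    · exact ih a
    · rw [pvGetDMap rows g hg0, ← hg]; exact ih _

theorem pvApply_map (rows : List Nat) (g : Nat → Nat)
    (hg : ∀ x y, g (x ^^^ y) = g x ^^^ g y) (hg0 : g 0 = 0) (v : Nat) :
    pvApply (rows.map g) v = g (pvApply rows v) := by
  have h := pvFoldMap rows g hg hg0 v (List.range 24) 0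
  rw [hg0] at h
  simpa [pvApply] using h

theorem pvRows0_getD (n : Nat) (hn : n < 24) : pvRows0.getD n 0 = pvStep (1 <<< n) := by
  simp [pvRows0, List.getD_eq_getElem?_getD, hn]

theorem pvBasisAux (v : Nat) : ∀ n, n ≤ 24 →
    (List.range n).foldl (fun acc i => if v.testBit i then acc ^^^ pvRows0.getD i 0 else acc) 0 =
      pvStep (v % 2 ^ n) := by
  intro n
  induction n with
  | zero => intro _; simp [Nat.mod_one, pvStep_zero]
  | succ n ih =>
    intro hn
    rw [List.range_succ, List.foldl_append]
    simp only [List.foldl_cons, List.foldl_nil]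
    rw [ih (by omega), pvRows0_getD n (by omega)]
    have hmod := Nat.mod_pow_succ (x := v) (b := 2) (k := n)
    have htb : v.testBit n = decide (v / 2 ^ n % 2 = 1) := Nat.testBit_eq_decide_div_mod_eq ..
    cases hb : v.testBit n
    · rw [hb] at htb
      have h0 : v / 2 ^ n % 2 = 0 := by
        have h2 : v / 2 ^ n % 2 < 2 := Nat.mod_lt _ (by norm_num)
        have := of_decide_eq_false htb.symm
        omega
      rw [h0, Nat.mul_zero] at hmod
      simp only [Bool.false_eq_true, reduceIte]
      congr 1
      omega
    · rw [hb] at htb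
      have h1 : v / 2 ^ n % 2 = 1 := of_decide_eq_true htb.symm
      rw [h1, Nat.mul_one] at hmod
      have hdisj : (v % 2 ^ n) &&& 2 ^ n = 0 := by
        rw [Nat.and_two_pow]
        have hfb : (v % 2 ^ n).testBit n = false := by
          rw [Nat.testBit_mod_two_pow]; simp
        rw [hfb]
        simp
      have hxor : v % 2 ^ (n + 1) = (v % 2 ^ n) ^^^ 2 ^ n := by
        rw [pvXorDisj _ _ hdisj]; omega
      rw [hxor, pvStep_xor]
      simp only [reduceIte]
      congr 2
      rw [Nat.shiftLeft_eq, one_mul]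

theorem pvApply_basis (v : Nat) (hv : v < 16777216) : pvApply pvRows0 v = pvStep v := by
  have h := pvBasisAux v 24 (le_refl 24)
  rw [show v % 2 ^ 24 = v by omega] at h
  simpa [pvApply] using h

theorem pvIterTwo (f : Nat → Nat) (k : Nat) (v : Nat) :
    (f ∘ f)^[k] v = f^[2 * k] v := by
  have h : f^[2] = f ∘ f := by
    funext x
    rw [show (2 : Nat) = 1 + 1 from rfl, Function.iterate_add_apply]
    simp
  rw [Function.iterate_mul, h]

theorem pvLoop_spec : ∀ (n : Nat) (f : Nat → Nat) (rows : List Nat),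
    (∀ x y, f (x ^^^ y) = f x ^^^ f y) → f 0 = 0 →
    (∀ w, w < 16777216 → f w < 16777216) →
    (∀ w, w < 16777216 → pvApply rows w = f w) →
    ∀ v, v < 16777216 → pvLoop rows n v = f^[n] v := by
  intro n
  induction n using Nat.strong_induction_on with
  | _ n ih =>
    intro f rows hx h0 hb hrep v hv
    by_cases hn : n = 0
    · subst hn; rw [pvLoop]; simp
    · rw [pvLoop]
      simp only [hn, if_false]
      have hAx : ∀ x y, pvApply rows (x ^^^ y) = pvApply rows x ^^^ pvApply rows y :=
        pvApply_xor rows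
      have hA0 : pvApply rows 0 = 0 := pvApply_zero rows
      have hrep2 : ∀ w, w < 16777216 → pvApply (rows.map (pvApply rows)) w = (f ∘ f) w := by
        intro w hw
        rw [pvApply_map rows (pvApply rows) hAx hA0 w, hrep w hw, hrep (f w) (hb w hw)]
        rfl
      have hx2 : ∀ x y, (f ∘ f) (x ^^^ y) = (f ∘ f) x ^^^ (f ∘ f) y := by
        intro x y; simp [Function.comp, hx]
      have h02 : (f ∘ f) 0 = 0 := by simp [Function.comp, h0]
      have hb2 : ∀ w, w < 16777216 → (f ∘ f) w < 16777216 := by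
        intro w hw; exact hb _ (hb _ hw)
      have hv' : (if n % 2 = 1 then pvApply rows v else v) = f^[n % 2] v := by
        rcases Nat.mod_two_eq_zero_or_one n with h | h <;> simp [h, hrep v hv]
      have hv'lt : f^[n % 2] v < 16777216 := by
        rcases Nat.mod_two_eq_zero_or_one n with h | h <;> simp [h]
        · exact hv
        · exact hb v hv
      rw [hv']
      rw [ih (n / 2) (Nat.div_lt_self (Nat.pos_of_ne_zero hn) (by norm_num)) (f ∘ f)
        (rows.map (pvApply rows)) hx2 h02 hb2 hrep2 (f^[n % 2] v) hv'lt]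
      rw [pvIterTwo]
      rw [← Function.iterate_add_apply]
      congr 1
      omega

theorem pvA_iter (s : Int) (n : Nat) :
    advance_secret s (n : Int) = pvAdvanceOne^[n] s := by
  induction n with
  | zero => simp [advance_secret, PySem.List.pyRange]
  | succ n ih =>
    unfold advance_secret at ih ⊢
    have hc : ((n + 1 : Nat) : Int) = (n : Int) + 1 := by push_cast; ring
    rw [hc, PySem.List.pyRange_one_succ_right (by positivity), List.foldl_append]
    simp only [List.foldl_cons, List.foldl_nil]
    rw [ih, Function.iterate_succ_apply']

theorem pvStepIter_lt (n : Nat) (t : Nat) : pvStep^[n + 1] t < 16777216 := by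
  rw [Function.iterate_succ_apply']
  exact pvStep_lt _

theorem pvIterBridge (n : Nat) (s : Int) :
    pvAdvanceOne^[n + 1] s = ((pvStep^[n + 1] (pvLow s) : Nat) : Int) := by
  induction n with
  | zero => simpa using pvAdvBridge s
  | succ n ih =>
    rw [Function.iterate_succ_apply' (f := pvAdvanceOne), ih, pvAdvBridge]
    rw [Function.iterate_succ_apply' (f := pvStep) (n := n + 1)]
    congr 2
    rw [pvLow_natCast]
    exact Nat.mod_eq_of_lt (pvStepIter_lt n _)

-- ===== VERDICT (by name: the statement is the Claim_ definition above) =====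
theorem advance_secret_spec : Claim_equal_advance_secret := by
  unfold Claim_equal_advance_secret Spec_advance_secret
  intro secret rounds _
  by_cases hr : rounds ≤ 0
  · unfold advance_secret advance_secret_alt
    rw [if_pos hr]
    have he : PySem.List.pyRange 0 rounds 1 = [] := by
      simp [PySem.List.pyRange]
      omega
    rw [he]
    rfl
  · have hn : rounds = ((rounds.toNat : Nat) : Int) := by omega
    have hpos : 1 ≤ rounds.toNat := by omega
    obtain ⟨m, hm⟩ : ∃ m, rounds.toNat = m + 1 := ⟨rounds.toNat - 1, by omega⟩
    conv_lhs => rw [hn]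
    rw [pvA_iter, hm, pvIterBridge]
    unfold advance_secret_alt
    rw [if_neg hr, pvBandMask]
    rw [Int.toNat_natCast, hm]
    congr 1
    exact (pvLoop_spec (m + 1) pvStep pvRows0 pvStep_xor pvStep_zero
      (fun w _ => pvStep_lt w) (fun w hw => pvApply_basis w hw) (pvLow secret)
      (pvLow_lt secret)).symm
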